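-- pv_equiv track=rewrite | github.com/joojjang/cote_for_beginners_practice | 섹션3.해시/기본 코드/1. 빈도수(ver 1).py | solution
-- ===== SOURCE A (Python) =====
-- def solution(nums):
--     answer = -1
--     once = []
--     frequency = dict()
--
--     for x in nums:
--         if x in frequency:
--             frequency[x] += 1
--         else:
--             frequency[x] = 1
--
--     for key in frequency:
--         if frequency[key] == 1:
--             once.append(key)
--     if len(once) != 0:
--         answer = max(once)
--
--     return answer
-- ===== SOURCE B (Python) =====
-- def solution(nums):
--     s = sorted(nums)
--     answer = -1
--     i = 0
--     n = len(s)
--     while i < n: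
--         j = i + 1
--         while j < n and s[j] == s[i]:
--             j += 1
--         if j == i + 1:
--             answer = s[i]
--         i = j
--     return answer
-- ===== Notes on version B (the rewrite author's own statement) =====
-- stated objective: alternative
-- what changed: Replaces the hash-map frequency count plus filter-and-max pass with sorting a copy and a single scan over runs of equal elements, remembering the last value whose run has length 1.
import Mathlib
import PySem

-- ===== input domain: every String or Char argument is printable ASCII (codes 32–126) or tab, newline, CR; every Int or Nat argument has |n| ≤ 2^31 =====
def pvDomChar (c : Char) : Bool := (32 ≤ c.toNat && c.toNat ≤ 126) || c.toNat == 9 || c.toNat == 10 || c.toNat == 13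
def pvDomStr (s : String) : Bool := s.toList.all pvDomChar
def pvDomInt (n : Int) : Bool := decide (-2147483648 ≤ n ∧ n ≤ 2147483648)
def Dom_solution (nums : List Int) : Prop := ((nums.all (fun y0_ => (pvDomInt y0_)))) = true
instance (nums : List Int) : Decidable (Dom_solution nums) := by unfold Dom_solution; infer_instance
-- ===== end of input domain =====

-- B replaces A's hash-frequency-then-filter-then-max strategy by sorting a copy and
-- scanning runs of equal elements once, keeping the last value whose run has length 1
-- (objective: alternative algorithm, same result).

-- ===== PORT A =====
def solution (nums : List Int) : Int :=
  let answer : Int := -1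
  let frequency : PySem.Dict Int Int :=
    nums.foldl (fun d x =>
      if (d.get? x).isSome then d.insert x (d.getD x 0 + 1) else d.insert x 1)
      PySem.Dict.empty
  let once : List Int :=
    frequency.keys.foldl (fun acc key =>
      if frequency.getD key 0 = 1 then acc ++ [key] else acc) []
  let answer := if once.length ≠ 0 then (PySem.List.max? once (fun x => x)).getD answer else answer
  answer

-- ===== PORT B =====
-- outer while over the sorted list: the inner while that advances j over the run of
-- s[i] is the dropWhile; 'j == i + 1' (run of length 1) is 'takeWhile … = []'.
def scanRuns (ans : Int) : List Int → Int
  | [] => ans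
  | x :: rest =>
      scanRuns (if rest.takeWhile (fun y => y == x) = [] then x else ans)
        (rest.dropWhile (fun y => y == x))
termination_by l => l.length
decreasing_by simpa using Nat.lt_succ_of_le (List.length_dropWhile_le _ _)

def solution_alt (nums : List Int) : Int :=
  scanRuns (-1) (PySem.List.sorted nums (fun x => x))

-- ===== PRECONDITION & SPEC =====
def Spec_solution (nums : List Int) (out : Int) : Prop := out = solution_alt nums
instance (nums : List Int) (out : Int) : Decidable (Spec_solution nums out) := by unfold Spec_solution; infer_instance

-- ===== CLAIM (what is proved, stated in full; the proofs are below) =====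
def Claim_equal_solution : Prop := ∀ (nums : List Int), Dom_solution nums → Spec_solution nums (solution nums)

-- ===== LEMMAS AND PROOFS =====

theorem pv_fold_eq_counter (nums : List Int) :
    nums.foldl (fun d x =>
      if (d.get? x).isSome then d.insert x (d.getD x 0 + 1) else d.insert x 1)
      PySem.Dict.empty = PySem.Dict.counter nums := by
  unfold PySem.Dict.counter
  congr 1
  funext d x
  by_cases h : (d.get? x).isSome
  · simp [PySem.Dict.modify, PySem.Dict.getD, h]
  · have h0 : d.get? x = none := Option.not_isSome_iff_eq_none.mp h
    simp [PySem.Dict.modify, PySem.Dict.getD, h0]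

theorem pv_once_eq (nums : List Int) :
    (PySem.Dict.counter nums).keys.foldl (fun acc key =>
      if (PySem.Dict.counter nums).getD key 0 = 1 then acc ++ [key] else acc) []
    = (PySem.Set.ofList nums).filter (fun k => nums.count k == 1) := by
  rw [show (fun (acc : List Int) key =>
        if (PySem.Dict.counter nums).getD key 0 = 1 then acc ++ [key] else acc)
      = (fun acc key =>
        if (fun k => decide ((PySem.Dict.counter nums).getD k 0 = 1)) key = true
        then acc ++ [(fun (k : Int) => k) key] else acc) from by
    funext acc key; simp]
  rw [PySem.List.foldl_append_if]
  simp only [List.nil_append, List.map_id_fun', id, PySem.Dict.keys_counter]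
  apply List.filter_congr
  intro k hk
  rw [PySem.Dict.getD_counter]
  by_cases hc : List.count k nums = 1 <;> simp [hc]

theorem pv_foldl_isSome (f : Option Int → Int → Option Int)
    (hf : ∀ m x, (f (some m) x).isSome) :
    ∀ (xs : List Int) (m : Int), (List.foldl f (some m) xs).isSome := by
  intro xs
  induction xs with
  | nil => intro m; simp
  | cons x xs ih =>
    intro m
    rw [List.foldl_cons]
    obtain ⟨y, hy⟩ := Option.isSome_iff_exists.mp (hf m x)
    rw [hy]
    exact ih y

theorem pv_max?_eq_none_iff (xs : List Int) :
    PySem.List.max? xs (fun x => x) = none ↔ xs = [] := by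
  cases xs with
  | nil => simp [PySem.List.max?]
  | cons x xs =>
    simp only [PySem.List.max?, List.foldl_cons]
    constructor
    · intro h
      refine absurd h (Option.ne_none_iff_isSome.mpr (pv_foldl_isSome _ ?_ xs x))
      intro m y
      by_cases hmy : m < y <;> simp [hmy]
    · intro h; cases h

theorem pv_getLastD_mem (l : List Int) (h : l ≠ []) (d : Int) : l.getLastD d ∈ l := by
  induction l generalizing d with
  | nil => exact absurd rfl h
  | cons a tl ih =>
    rw [List.getLastD_cons]
    cases tl with
    | nil => simp
    | cons b tb => exact List.mem_cons_of_mem _ (ih (by simp) a)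

theorem pv_le_getLastD (l : List Int) (hl : l.Pairwise (· ≤ ·)) (d : Int)
    (v : Int) (hv : v ∈ l) : v ≤ l.getLastD d := by
  induction l generalizing d with
  | nil => cases hv
  | cons a tl ih =>
    rw [List.getLastD_cons]
    rcases List.mem_cons.mp hv with rfl | hv'
    · cases tl with
      | nil => simp
      | cons b tb =>
        have hmem := pv_getLastD_mem (b :: tb) (by simp) v
        exact (List.pairwise_cons.mp hl).1 _ hmem
    · exact ih (List.pairwise_cons.mp hl).2 a hv'

theorem pv_scanRuns_eq : ∀ (ans : Int) (s : List Int), s.Pairwise (· ≤ ·) →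
    scanRuns ans s = (s.filter (fun v => s.count v == 1)).getLastD ans := by
  intro ans s
  induction ans, s using scanRuns.induct with
  | case1 ans => intro _; simp [scanRuns]
  | case2 ans x rest ih =>
    intro hs
    -- abbreviations
    have h2 : rest.takeWhile (fun y => y == x) ++ rest.dropWhile (fun y => y == x) = rest :=
      List.takeWhile_append_dropWhile
    have hxle : ∀ v ∈ rest, x ≤ v := (List.pairwise_cons.mp hs).1
    have hpr : (rest.dropWhile (fun y => y == x)).Pairwise (· ≤ ·) :=
      List.Pairwise.sublist (List.dropWhile_sublist _) (List.pairwise_cons.mp hs).2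
    have h1 : ∀ y ∈ rest.takeWhile (fun y => y == x), y = x := by
      intro y hy
      have hb := List.mem_takeWhile_imp hy
      simpa using hb
    have hxr : ∀ v ∈ rest.dropWhile (fun y => y == x), x < v := by
      cases hr : rest.dropWhile (fun y => y == x) with
      | nil => intro v hv; cases hv
      | cons h0 tr =>
        have hh : (h0 == x) = false := by
          have := List.head?_dropWhile_not (fun y => y == x) rest
          rw [hr] at this
          simpa using this
        have hmemr : ∀ v ∈ h0 :: tr, v ∈ rest := by
          intro v hv
          exact (List.dropWhile_sublist _).mem (hr ▸ hv)
        have hxh : x < h0 := by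
          rcases lt_or_eq_of_le (hxle h0 (hmemr h0 (by simp))) with h | h
          · exact h
          · exact absurd h.symm (by simpa using hh)
        intro v hv
        rcases List.mem_cons.mp hv with rfl | hv'
        · exact hxh
        · exact lt_of_lt_of_le hxh ((List.pairwise_cons.mp (hr ▸ hpr)).1 v hv')
    have hxnr : x ∉ rest.dropWhile (fun y => y == x) := fun hmem => absurd (hxr x hmem) (lt_irrefl x)
    have hct : (rest.takeWhile (fun y => y == x)).count x = (rest.takeWhile (fun y => y == x)).length := by
      rw [List.count_eq_length]
      intro b hb
      simp [h1 b hb]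
    have hrx : rest.count x = (rest.takeWhile (fun y => y == x)).length := by
      conv_lhs => rw [← h2]
      rw [List.count_append, hct, List.count_eq_zero.mpr hxnr]
      omega
    have hcx : (x :: rest).count x = 1 + (rest.takeWhile (fun y => y == x)).length := by
      rw [List.count_cons_self, hrx]
      omega
    have hcv : ∀ v ∈ rest.dropWhile (fun y => y == x),
        (x :: rest).count v = (rest.dropWhile (fun y => y == x)).count v := by
      intro v hv
      have hvx : v ≠ x := fun h => absurd (h ▸ hxr v hv) (lt_irrefl x)
      have hvt : (rest.takeWhile (fun y => y == x)).count v = 0 :=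
        List.count_eq_zero.mpr (fun hm => hvx (h1 v hm))
      rw [List.count_cons_of_ne hvx.symm]
      conv_lhs => rw [← h2]
      rw [List.count_append, hvt]
      omega
    -- filter over the run block
    have hfr : (rest.dropWhile (fun y => y == x)).filter (fun v => (x :: rest).count v == 1)
        = (rest.dropWhile (fun y => y == x)).filter
            (fun v => (rest.dropWhile (fun y => y == x)).count v == 1) := by
      apply List.filter_congr
      intro v hv
      rw [hcv v hv]
    by_cases ht : rest.takeWhile (fun y => y == x) = []
    · have hrr : rest.dropWhile (fun y => y == x) = rest := by
        conv_rhs => rw [← h2, ht, List.nil_append]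
      rw [scanRuns, if_pos ht]
      simp only [ht, dite_true] at ih
      rw [ih hpr]
      have hpx : ((x :: rest).count x == 1) = true := by
        rw [hcx, ht]
        simp
      rw [List.filter_cons, if_pos hpx] -- hope shape
      rw [List.getLastD_cons]
      rw [hrr] at hfr ⊢
      rw [hfr]
    · rw [scanRuns, if_neg ht]
      simp only [ht, dite_false] at ih
      rw [ih hpr]
      have hlen : (rest.takeWhile (fun y => y == x)).length ≠ 0 := by
        simpa [List.length_eq_zero_iff] using ht
      have hpx : ((x :: rest).count x == 1) = false := by
        simp only [beq_eq_false_iff_ne, Ne, hcx]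
        omega
      have hft : (rest.takeWhile (fun y => y == x)).filter (fun v => (x :: rest).count v == 1) = [] := by
        rw [List.filter_eq_nil_iff]
        intro y hy
        rw [h1 y hy]
        simp only [beq_iff_eq, hcx]
        omega
      have hsplit : List.filter (fun v => List.count v (x :: rest) == 1) rest
          = List.filter (fun v => List.count v (x :: rest) == 1) (rest.takeWhile (fun y => y == x))
            ++ List.filter (fun v => List.count v (x :: rest) == 1) (rest.dropWhile (fun y => y == x)) := by
        conv_lhs => rw [show rest = rest.takeWhile (fun y => y == x) ++ rest.dropWhile (fun y => y == x) from h2.symm]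
        rw [List.filter_append, h2]
      rw [List.filter_cons, if_neg (by rw [hpx]; simp), hsplit, hft, List.nil_append, hfr]

theorem pv_main (nums : List Int) :
    (PySem.List.max? ((PySem.Set.ofList nums).filter (fun k => nums.count k == 1)) (fun x => x)).getD (-1)
    = ((PySem.List.sorted nums (fun x => x)).filter
        (fun v => (PySem.List.sorted nums (fun x => x)).count v == 1)).getLastD (-1) := by
  set s := PySem.List.sorted nums (fun x => x) with hsdef
  set LA := (PySem.Set.ofList nums).filter (fun k => nums.count k == 1) with hLAdef
  set LB := s.filter (fun v => s.count v == 1) with hLBdef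
  have hperm : s.Perm nums := PySem.List.sorted_perm nums (fun x => x) false
  have hcnt : ∀ v, s.count v = nums.count v := fun v => hperm.count_eq v
  have hmem : ∀ v, v ∈ LB ↔ v ∈ LA := by
    intro v
    rw [hLBdef, hLAdef]
    simp [List.mem_filter, hcnt, PySem.Set.mem_ofList, hperm.mem_iff]
  have hsorted : s.Pairwise (· ≤ ·) := by
    have := PySem.List.sorted_pairwise nums (fun x => x)
    exact this
  have hnodB : LB.Nodup := by
    rw [List.nodup_iff_count_le_one]
    intro a
    by_cases hp : (s.count a == 1) = true
    · rw [hLBdef, List.count_filter (p := fun v => List.count v s == 1) (l := s) hp]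
      simp only [beq_iff_eq] at hp
      omega
    · have hna : a ∉ LB := fun hm => hp (List.of_mem_filter (p := fun v => List.count v s == 1) hm)
      simp [List.count_eq_zero.mpr hna]
  have hnodA : LA.Nodup := List.Nodup.filter _ (PySem.Set.nodup_ofList nums)
  have hperm2 : LB.Perm LA := (List.perm_ext_iff_of_nodup hnodB hnodA).mpr (fun a => hmem a)
  by_cases hLA : LA = []
  · have hLB : LB = [] := (hLA ▸ hperm2).eq_nil
    rw [hLA, hLB]
    simp [PySem.List.max?]
  · have hLB : LB ≠ [] := fun h => hLA (h ▸ hperm2).symm.eq_nil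
    cases hm : PySem.List.max? LA (fun x => x) with
    | none => exact absurd ((pv_max?_eq_none_iff LA).mp hm) hLA
    | some m =>
      have hmA : m ∈ LA := PySem.List.max?_mem hm
      have hsortB : LB.Pairwise (· ≤ ·) := List.Pairwise.sublist List.filter_sublist hsorted
      have hlm : LB.getLastD (-1) ∈ LB := pv_getLastD_mem LB hLB (-1)
      have hle1 : LB.getLastD (-1) ≤ m := PySem.List.max?_isMax hm _ ((hmem _).mp hlm)
      have hle2 : m ≤ LB.getLastD (-1) := pv_le_getLastD LB hsortB (-1) m ((hmem m).mpr hmA)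
      simp only [Option.getD_some]
      omega

-- ===== VERDICT (by name: the statement is the Claim_ definition above) =====
theorem solution_spec : Claim_equal_solution := by
  intro nums _
  unfold Spec_solution
  have hA : solution nums
      = (PySem.List.max? ((PySem.Set.ofList nums).filter (fun k => nums.count k == 1)) (fun x => x)).getD (-1) := by
    unfold solution
    simp only [pv_fold_eq_counter, pv_once_eq]
    by_cases hL : (PySem.Set.ofList nums).filter (fun k => nums.count k == 1) = []
    · rw [hL]
      simp [PySem.List.max?]
    · have hlen : ((PySem.Set.ofList nums).filter (fun k => nums.count k == 1)).length ≠ 0 := by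
        simpa [List.length_eq_zero_iff] using hL
      simp [hlen]
  have hB : solution_alt nums
      = ((PySem.List.sorted nums (fun x => x)).filter
          (fun v => (PySem.List.sorted nums (fun x => x)).count v == 1)).getLastD (-1) := by
    unfold solution_alt
    exact pv_scanRuns_eq (-1) _ (PySem.List.sorted_pairwise nums (fun x => x))
  rw [hA, hB]
  exact pv_main nums
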